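-- pv_equiv track=rewrite | github.com/lopertyup/Forge_master_Update | data/canonical.py | canonical_age_int
-- ===== SOURCE A (Python) =====
-- from typing import Dict, Optional
--
-- AGE_NAME_TO_INT: Dict[str, int] = {
--     "Primitive": 0,
--     "Medieval": 1,
--     "Earlymodern": 2,
--     "Early-Modern": 2,
--     "EarlyModern": 2,
--     "Modern": 3,
--     "Space": 4,
--     "Interstellar": 5,
--     "Multiverse": 6,
--     "Quantum": 7,
--     "Underworld": 8,
--     "Divine": 9,
-- }
--
-- def canonical_age_int(value: str) -> Optional[int]:
--     label = str(value or "").strip()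
--     if label in AGE_NAME_TO_INT:
--         return AGE_NAME_TO_INT[label]
--     compact = label.replace(" ", "").replace("_", "")
--     for name, idx in AGE_NAME_TO_INT.items():
--         if compact.lower() == name.replace(" ", "").replace("_", "").lower():
--             return idx
--     return None
-- ===== SOURCE B (Python) =====
-- from typing import Dict, Optional
--
-- AGE_NAME_TO_INT: Dict[str, int] = {
--     "Primitive": 0,
--     "Medieval": 1,
--     "Earlymodern": 2,
--     "Early-Modern": 2,
--     "EarlyModern": 2,
--     "Modern": 3,
--     "Space": 4,
--     "Interstellar": 5,
--     "Multiverse": 6,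
--     "Quantum": 7,
--     "Underworld": 8,
--     "Divine": 9,
-- }
--
-- def _norm(s: str) -> str:
--     return s.replace(" ", "").replace("_", "").lower()
--
-- _NORM: Dict[str, int] = {_norm(name): idx for name, idx in AGE_NAME_TO_INT.items()}
--
-- def canonical_age_int(value: str) -> Optional[int]:
--     return _NORM.get(_norm(str(value or "").strip()))
-- ===== Notes on version B (the rewrite author's own statement) =====
-- stated objective: simpler
-- what changed: B precomputes a dict keyed by the normalized names once at module scope and answers each query with a single lookup of the normalized input, eliminating A's exact-match branch and linear scan over the table (safe because colliding normalized keys share the same code).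
import Mathlib
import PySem

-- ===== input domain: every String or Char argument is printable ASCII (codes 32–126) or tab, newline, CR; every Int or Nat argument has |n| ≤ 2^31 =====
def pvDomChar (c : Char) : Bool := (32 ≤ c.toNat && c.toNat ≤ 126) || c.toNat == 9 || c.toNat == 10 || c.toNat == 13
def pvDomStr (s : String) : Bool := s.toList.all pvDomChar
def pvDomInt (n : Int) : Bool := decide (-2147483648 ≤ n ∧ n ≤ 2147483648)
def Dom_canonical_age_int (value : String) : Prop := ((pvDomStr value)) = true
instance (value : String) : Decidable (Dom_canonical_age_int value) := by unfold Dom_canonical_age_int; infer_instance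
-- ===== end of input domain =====

-- B replaces A's exact-match branch plus linear scan by one lookup in a precomputed
-- normalized-key table (objective: simpler).

-- ===== PORT A =====
def pvAgeItems : List (String × Int) :=
  [("Primitive", 0), ("Medieval", 1), ("Earlymodern", 2), ("Early-Modern", 2),
   ("EarlyModern", 2), ("Modern", 3), ("Space", 4), ("Interstellar", 5),
   ("Multiverse", 6), ("Quantum", 7), ("Underworld", 8), ("Divine", 9)]

-- the for-loop over AGE_NAME_TO_INT.items(), returning the first normalized match
def pvAgeLoop (compact : String) : List (String × Int) → Option Int
  | [] => none
  | (name, idx) :: rest =>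
      if PySem.Str.lower compact ==
          PySem.Str.lower (PySem.Str.replace (PySem.Str.replace name " " "") "_" "") then
        some idx
      else pvAgeLoop compact rest

def canonical_age_int (value : String) : Option Int :=
  let label := PySem.Str.strip (if value == "" then "" else value)
  if (PySem.Dict.mk pvAgeItems).contains label then
    (PySem.Dict.mk pvAgeItems).get? label
  else
    let compact := PySem.Str.replace (PySem.Str.replace label " " "") "_" ""
    pvAgeLoop compact pvAgeItems

-- ===== PORT B =====
def pvNormKey (s : String) : String :=
  PySem.Str.lower (PySem.Str.replace (PySem.Str.replace s " " "") "_" "")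

def pvNormDict : PySem.Dict String Int :=
  pvAgeItems.foldl (fun d p => d.insert (pvNormKey p.1) p.2) PySem.Dict.empty

def canonical_age_int_alt (value : String) : Option Int :=
  pvNormDict.get? (pvNormKey (PySem.Str.strip (if value == "" then "" else value)))

-- ===== PRECONDITION & SPEC =====
def Spec_canonical_age_int (value : String) (out : Option Int) : Prop := out = canonical_age_int_alt value
instance (value : String) (out : Option Int) : Decidable (Spec_canonical_age_int value out) := by unfold Spec_canonical_age_int; infer_instance

-- ===== CLAIM (what is proved, stated in full; the proofs are below) =====
def Claim_equal_canonical_age_int : Prop := ∀ (value : String), Dom_canonical_age_int value → Spec_canonical_age_int value (canonical_age_int value)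

-- ===== LEMMAS AND PROOFS =====

-- the normalized-key table B builds, evaluated to its literal items
theorem pvNormDict_eq : pvNormDict = PySem.Dict.mk [("primitive",0),("medieval",1),("earlymodern",2),("early-modern",2),("modern",3),
   ("space",4),("interstellar",5),("multiverse",6),("quantum",7),("underworld",8),("divine",9)] := by
  have h1 : pvNormKey "Primitive" = "primitive" := by decide
  have h2 : pvNormKey "Medieval" = "medieval" := by decide
  have h3 : pvNormKey "Earlymodern" = "earlymodern" := by decide
  have h4 : pvNormKey "Early-Modern" = "early-modern" := by decide
  have h5 : pvNormKey "EarlyModern" = "earlymodern" := by decide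
  have h6 : pvNormKey "Modern" = "modern" := by decide
  have h7 : pvNormKey "Space" = "space" := by decide
  have h8 : pvNormKey "Interstellar" = "interstellar" := by decide
  have h9 : pvNormKey "Multiverse" = "multiverse" := by decide
  have h10 : pvNormKey "Quantum" = "quantum" := by decide
  have h11 : pvNormKey "Underworld" = "underworld" := by decide
  have h12 : pvNormKey "Divine" = "divine" := by decide
  simp [pvNormDict, pvAgeItems, List.foldl, h1,h2,h3,h4,h5,h6,h7,h8,h9,h10,h11,h12,
    PySem.Dict.insert, PySem.Dict.empty]

theorem pvAgeLoop_eq_norm (c : String) :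
    pvAgeLoop c pvAgeItems = pvNormDict.get? (PySem.Str.lower c) := by
  have e1 : PySem.Str.lower (PySem.Str.replace (PySem.Str.replace "Primitive" " " "") "_" "") = "primitive" := by decide
  have e2 : PySem.Str.lower (PySem.Str.replace (PySem.Str.replace "Medieval" " " "") "_" "") = "medieval" := by decide
  have e3 : PySem.Str.lower (PySem.Str.replace (PySem.Str.replace "Earlymodern" " " "") "_" "") = "earlymodern" := by decide
  have e4 : PySem.Str.lower (PySem.Str.replace (PySem.Str.replace "Early-Modern" " " "") "_" "") = "early-modern" := by decide
  have e5 : PySem.Str.lower (PySem.Str.replace (PySem.Str.replace "EarlyModern" " " "") "_" "") = "earlymodern" := by decide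
  have e6 : PySem.Str.lower (PySem.Str.replace (PySem.Str.replace "Modern" " " "") "_" "") = "modern" := by decide
  have e7 : PySem.Str.lower (PySem.Str.replace (PySem.Str.replace "Space" " " "") "_" "") = "space" := by decide
  have e8 : PySem.Str.lower (PySem.Str.replace (PySem.Str.replace "Interstellar" " " "") "_" "") = "interstellar" := by decide
  have e9 : PySem.Str.lower (PySem.Str.replace (PySem.Str.replace "Multiverse" " " "") "_" "") = "multiverse" := by decide
  have e10 : PySem.Str.lower (PySem.Str.replace (PySem.Str.replace "Quantum" " " "") "_" "") = "quantum" := by decide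
  have e11 : PySem.Str.lower (PySem.Str.replace (PySem.Str.replace "Underworld" " " "") "_" "") = "underworld" := by decide
  have e12 : PySem.Str.lower (PySem.Str.replace (PySem.Str.replace "Divine" " " "") "_" "") = "divine" := by decide
  rw [pvNormDict_eq]
  simp only [pvAgeLoop, pvAgeItems, e1,e2,e3,e4,e5,e6,e7,e8,e9,e10,e11,e12,
    PySem.Dict.get?_mk_cons, beq_iff_eq]
  generalize PySem.Str.lower c = k
  by_cases k1 : k = "primitive"
  · simp [k1]
  simp only [if_neg k1, if_neg (Ne.symm k1)]
  by_cases k2 : k = "medieval"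
  · simp [k2]
  simp only [if_neg k2, if_neg (Ne.symm k2)]
  by_cases k3 : k = "earlymodern"
  · simp [k3]
  simp only [if_neg k3, if_neg (Ne.symm k3)]
  by_cases k4 : k = "early-modern"
  · simp [k4]
  simp only [if_neg k4, if_neg (Ne.symm k4)]
  by_cases k5 : k = "modern"
  · simp [k5]
  simp only [if_neg k5, if_neg (Ne.symm k5)]
  by_cases k6 : k = "space"
  · simp [k6]
  simp only [if_neg k6, if_neg (Ne.symm k6)]
  by_cases k7 : k = "interstellar"
  · simp [k7]
  simp only [if_neg k7, if_neg (Ne.symm k7)]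
  by_cases k8 : k = "multiverse"
  · simp [k8]
  simp only [if_neg k8, if_neg (Ne.symm k8)]
  by_cases k9 : k = "quantum"
  · simp [k9]
  simp only [if_neg k9, if_neg (Ne.symm k9)]
  by_cases k10 : k = "underworld"
  · simp [k10]
  simp only [if_neg k10, if_neg (Ne.symm k10)]
  by_cases k11 : k = "divine"
  · simp [k11]
  simp only [if_neg k11, if_neg (Ne.symm k11)]
  rfl

theorem pvCore (s : String) :
    (if (PySem.Dict.mk pvAgeItems).contains s then
      (PySem.Dict.mk pvAgeItems).get? s
    else
      pvAgeLoop (PySem.Str.replace (PySem.Str.replace s " " "") "_" "") pvAgeItems)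
    = pvNormDict.get? (pvNormKey s) := by
  by_cases hc : (PySem.Dict.mk pvAgeItems).contains s
  · rw [if_pos hc, pvNormDict_eq]
    simp [pvAgeItems, PySem.Dict.contains_mk] at hc
    rcases hc with h|h|h|h|h|h|h|h|h|h|h|h <;> subst h <;> decide
  · rw [if_neg hc]
    have := pvAgeLoop_eq_norm (PySem.Str.replace (PySem.Str.replace s " " "") "_" "")
    simpa [pvNormKey] using this

-- ===== VERDICT (by name: the statement is the Claim_ definition above) =====
theorem canonical_age_int_spec : Claim_equal_canonical_age_int := by
  intro value _
  unfold Spec_canonical_age_int canonical_age_int canonical_age_int_alt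
  exact pvCore _
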